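-- pv_equiv track=rewrite | github.com/twoimo/tzudong | backend/restaurant-evaluation/scripts/reorder_keys.py | reorder_laaj_item
-- ===== SOURCE A (Python) =====
-- from collections import OrderedDict
--
-- def reorder_laaj_item(item: dict) -> dict:
--     """LAAJ 평가 항목 키 순서: name 맨 앞"""
--     ordered = OrderedDict()
--     if "name" in item:
--         ordered["name"] = item["name"]
--     for k, v in item.items():
--         if k != "name":
--             ordered[k] = v
--     return dict(ordered)
-- ===== SOURCE B (Python) =====
-- def reorder_laaj_item(item: dict) -> dict:
--     """LAAJ 평가 항목 키 순서: name 맨 앞"""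
--     return dict(sorted(item.items(), key=lambda kv: kv[0] != "name"))
-- ===== Notes on version B (the rewrite author's own statement) =====
-- stated objective: idiomatic
-- what changed: Replaced the OrderedDict with a conditional pre-insert and an explicit skip-'name' loop by a single expression: a stable sort on the boolean key kv[0] != 'name', which floats the 'name' entry to the front while keeping all other keys in their original order.
import Mathlib
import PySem

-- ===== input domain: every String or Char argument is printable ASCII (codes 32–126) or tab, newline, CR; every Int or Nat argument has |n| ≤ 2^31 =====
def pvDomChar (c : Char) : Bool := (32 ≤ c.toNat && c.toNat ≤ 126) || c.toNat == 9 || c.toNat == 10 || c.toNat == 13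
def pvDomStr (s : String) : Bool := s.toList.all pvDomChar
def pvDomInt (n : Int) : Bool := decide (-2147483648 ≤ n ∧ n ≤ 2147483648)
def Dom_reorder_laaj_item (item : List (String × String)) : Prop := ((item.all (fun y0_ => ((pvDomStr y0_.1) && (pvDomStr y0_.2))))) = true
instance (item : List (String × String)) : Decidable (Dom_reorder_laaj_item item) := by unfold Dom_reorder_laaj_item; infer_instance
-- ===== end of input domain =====

-- B replaces A's OrderedDict-and-skip-loop by one stable sort on the boolean key (k != "name"); idiomatic, not faster.


-- ===== PORT A =====
-- ordered = OrderedDict(); if "name" in item: ordered["name"] = item["name"];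
-- for k, v in item.items(): if k != "name": ordered[k] = v; return dict(ordered)
-- (item["name"] cannot raise under the 'contains' guard, so '.getD ""' is never the result)
def reorder_laaj_item (item : List (String × String)) : List (String × String) :=
  let d := PySem.Dict.mk item
  let ordered : PySem.Dict String String :=
    if d.contains "name" then PySem.Dict.empty.insert "name" ((d.get? "name").getD "") else PySem.Dict.empty
  (item.foldl (fun o kv => if kv.1 != "name" then o.insert kv.1 kv.2 else o) ordered).items

-- ===== PORT B =====
-- return dict(sorted(item.items(), key=lambda kv: kv[0] != "name"))
def reorder_laaj_item_alt (item : List (String × String)) : List (String × String) :=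
  (PySem.Dict.ofList (PySem.List.sorted item (fun kv => kv.1 != "name") false)).items

-- ===== PRECONDITION & SPEC =====
-- Pre_ excludes association lists with a duplicated key: such a list does not represent any
-- Python dict, so A (whose parameter is a dict) is never called on it.
def Pre_reorder_laaj_item (item : List (String × String)) : Prop := (item.map Prod.fst).Nodup
instance (item : List (String × String)) : Decidable (Pre_reorder_laaj_item item) := by unfold Pre_reorder_laaj_item; infer_instance
def pvWitness_reorder_laaj_item : (List (String × String)) := [("b", "1"), ("name", "n"), ("a", "2")]

def Spec_reorder_laaj_item (item : List (String × String)) (out : List (String × String)) : Prop := out = reorder_laaj_item_alt item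
instance (item : List (String × String)) (out : List (String × String)) : Decidable (Spec_reorder_laaj_item item out) := by unfold Spec_reorder_laaj_item; infer_instance

-- ===== CLAIM (what is proved, stated in full; the proofs are below) =====
def Claim_equal_reorder_laaj_item : Prop := ∀ (item : List (String × String)), Dom_reorder_laaj_item item → Pre_reorder_laaj_item item → Spec_reorder_laaj_item item (reorder_laaj_item item)

-- ===== LEMMAS AND PROOFS =====

-- stable insertion of a false-key element: it lands at the end of the false block
theorem pv_insertBy_false {α : Type} (p : α → Bool) (x : α) (hx : p x = false) :
    ∀ (fs ts : List α), (∀ a ∈ fs, p a = false) → (∀ a ∈ ts, p a = true) →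
      PySem.List.insertBy (fun a b => decide (p a < p b)) x (fs ++ ts) = (fs ++ [x]) ++ ts := by
  intro fs
  induction fs with
  | nil =>
    intro ts _ ht
    cases ts with
    | nil => simp [PySem.List.insertBy]
    | cons y ys =>
      have hy : p y = true := ht y (by simp)
      simp [PySem.List.insertBy, hx, hy]
  | cons f fs ih =>
    intro ts hf ht
    have hfv : p f = false := hf f (by simp)
    simp only [List.cons_append, PySem.List.insertBy]
    simp only [decide_eq_true_eq]
    rw [if_neg (by simp [hfv, hx])]
    have := ih ts (fun a ha => hf a (by simp [ha])) ht
    simp_all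

-- insertion of a true-key element always appends
theorem pv_insertBy_true {α : Type} (p : α → Bool) (x : α) (hx : p x = true) :
    ∀ (l : List α), PySem.List.insertBy (fun a b => decide (p a < p b)) x l = l ++ [x] := by
  intro l
  induction l with
  | nil => simp [PySem.List.insertBy]
  | cons y ys ih =>
    simp only [PySem.List.insertBy]
    rw [if_neg (by simp [hx])]
    simp [ih]

theorem pv_sort_fold {α : Type} (p : α → Bool) :
    ∀ (xs fs ts : List α), (∀ a ∈ fs, p a = false) → (∀ a ∈ ts, p a = true) →
      xs.foldl (fun acc x => PySem.List.insertBy (fun a b => decide (p a < p b)) x acc) (fs ++ ts)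
        = (fs ++ xs.filter (fun x => !p x)) ++ (ts ++ xs.filter p) := by
  intro xs
  induction xs with
  | nil => intro fs ts _ _; simp
  | cons x xs ih =>
    intro fs ts hf ht
    cases hx : p x with
    | false =>
      simp only [List.foldl_cons, pv_insertBy_false p x hx fs ts hf ht]
      rw [ih (fs ++ [x]) ts (by intro a ha; rcases List.mem_append.1 ha with h | h
                                · exact hf a h
                                · simp_all) ht]
      simp [hx]
    | true =>
      have : PySem.List.insertBy (fun a b => decide (p a < p b)) x (fs ++ ts) = fs ++ (ts ++ [x]) := by
        rw [pv_insertBy_true p x hx]; simp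
      simp only [List.foldl_cons, this]
      rw [ih fs (ts ++ [x]) hf (by intro a ha; rcases List.mem_append.1 ha with h | h
                                   · exact ht a h
                                   · simp_all)]
      simp [hx]

-- a stable sort on a Bool key is: false block first, then true block, each in input order
theorem pv_sorted_bool {α : Type} (p : α → Bool) (xs : List α) :
    PySem.List.sorted xs (fun x => p x) false = xs.filter (fun x => !p x) ++ xs.filter p := by
  have := pv_sort_fold p xs [] [] (by simp) (by simp)
  simpa [PySem.List.sorted] using this

-- with unique keys, the "name" entries of the list are exactly the first find
theorem pv_filter_key (l : List (String × String)) (h : (l.map Prod.fst).Nodup) :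
    l.filter (fun kv => kv.1 == "name") = (l.find? (fun kv => kv.1 == "name")).toList := by
  induction l with
  | nil => simp
  | cons kv t ih =>
    simp only [List.map_cons, List.nodup_cons] at h
    by_cases hk : kv.1 = "name"
    · have : t.filter (fun kv => kv.1 == "name") = [] := by
        rw [List.filter_eq_nil_iff]
        intro a ha hbeq
        exact h.1 (by rw [hk, ← (by simpa using hbeq : a.1 = "name")]; exact List.mem_map_of_mem ha)
      simp [hk, this]
    · simp [hk, ih h.2]

theorem reorder_eq (item : List (String × String)) (h : (item.map Prod.fst).Nodup) :
    reorder_laaj_item item = reorder_laaj_item_alt item := by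
  -- A-side: the skip-loop is a fold over the filtered list of fresh keys
  have hfilter_nodup : ((item.filter (fun kv => kv.1 != "name")).map Prod.fst).Nodup :=
    (List.Sublist.map Prod.fst List.filter_sublist).nodup h
  unfold reorder_laaj_item reorder_laaj_item_alt
  change (item.foldl (fun o kv => if kv.1 != "name" then o.insert kv.1 kv.2 else o)
      (if (PySem.Dict.mk item).contains "name" then
        PySem.Dict.empty.insert "name" (((PySem.Dict.mk item).get? "name").getD "")
      else PySem.Dict.empty)).items = _
  rw [PySem.List.foldl_if_eq_foldl_filter (fun kv => kv.1 != "name")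
        (fun (o : PySem.Dict String String) kv => o.insert kv.1 kv.2) item]
  rw [PySem.Dict.items_foldl_insert_fresh (item.filter (fun kv => kv.1 != "name"))
        Prod.fst Prod.snd _
        (by intro a ha
            have hane : a.1 ≠ "name" := by
              have := List.of_mem_filter ha; simpa using this
            split
            · simp [PySem.Dict.insert, PySem.Dict.contains, PySem.Dict.empty]
              exact fun hh => hane hh.symm
            · simp [PySem.Dict.contains, PySem.Dict.empty])
        hfilter_nodup]
  -- B-side: stable sort = ("name" block) ++ (the rest), and ofList over unique keys is the identity
  rw [pv_sorted_bool (fun kv => kv.1 != "name") item]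
  have hnameF : item.filter (fun kv => !(kv.1 != "name")) = item.filter (fun kv => kv.1 == "name") := by
    apply List.filter_congr; intro a _; simp [bne]
  rw [hnameF]
  have hperm : ((item.filter (fun kv => kv.1 == "name")) ++ (item.filter (fun kv => kv.1 != "name"))).Perm item := by
    have := List.filter_append_perm (fun kv => kv.1 == "name") item
    simpa [bne] using this
  have hsortkeys :
      (((item.filter (fun kv => kv.1 == "name")) ++ (item.filter (fun kv => kv.1 != "name"))).map Prod.fst).Nodup :=
    ((hperm.map Prod.fst).nodup_iff).2 h
  have hofl : (PySem.Dict.ofList ((item.filter (fun kv => kv.1 == "name")) ++ (item.filter (fun kv => kv.1 != "name")))).items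
      = (item.filter (fun kv => kv.1 == "name")) ++ (item.filter (fun kv => kv.1 != "name")) := by
    show (PySem.Dict.update PySem.Dict.empty _).items = _
    unfold PySem.Dict.update
    rw [PySem.Dict.items_foldl_insert_fresh _ Prod.fst Prod.snd PySem.Dict.empty
          (by intro a _; simp [PySem.Dict.contains, PySem.Dict.empty]) hsortkeys]
    simp [PySem.Dict.empty]
  rw [hofl]
  -- both sides are <name block> ++ filter (≠ name); identify the two name blocks
  rw [pv_filter_key item h]
  have hget : (PySem.Dict.mk item).get? "name" = ((item.find? (fun kv => kv.1 == "name")).map Prod.snd) := by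
    simp [PySem.Dict.get?]
  have hcont : (PySem.Dict.mk item).contains "name" = item.any (fun kv => kv.1 == "name") := rfl
  cases hfind : item.find? (fun kv => kv.1 == "name") with
  | none =>
    have : item.any (fun kv => kv.1 == "name") = false := by
      rw [List.any_eq_false]; intro a ha
      exact List.find?_eq_none.1 hfind a ha
    simp [hcont, this, PySem.Dict.empty]
  | some kv =>
    obtain ⟨k0, v0⟩ := kv
    have hkv : k0 = "name" := by simpa using List.find?_some hfind
    subst hkv
    have : item.any (fun kv => kv.1 == "name") = true := by
      rw [List.any_eq_true]; exact ⟨_, List.mem_of_find?_eq_some hfind, by simp⟩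
    simp [this, hget, hfind, PySem.Dict.insert, PySem.Dict.contains, PySem.Dict.empty]

-- ===== VERDICT (by name: the statement is the Claim_ definition above) =====
theorem reorder_laaj_item_spec : Claim_equal_reorder_laaj_item := by
  intro item _ hpre
  exact reorder_eq item hpre
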